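-- pv_equiv track=rewrite | github.com/lol-mann/parametric_video | polynomial_template.py | equation_to_polynomial
-- ===== SOURCE A (Python) =====
-- def equation_to_polynomial(equation):
--   max_degree=max(list(equation.keys()))
--   polynomial_list=[]
--   for deg in range(max_degree+1):
--     try:
--       polynomial_list.insert(0,equation[deg])
--     except:
--       polynomial_list.insert(0,0)
--   return polynomial_list
-- ===== SOURCE B (Python) =====
-- def equation_to_polynomial(equation):
--   max_degree = max(equation.keys())
--   result = [0] * (max_degree + 1)
--   for deg, coeff in equation.items():
--     if deg >= 0:
--       result[max_degree - deg] = coeff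
--   return result
-- ===== Notes on version B (the rewrite author's own statement) =====
-- stated objective: faster
-- what changed: B preallocates the descending result list and scatters each (degree, coeff) item into its slot in one pass over the dict items, instead of A's per-degree dict lookup with insert(0, ...) front-insertion over range(max_degree+1).
-- outside the precondition, e.g. on equation_to_polynomial({}): A raises ValueError, B raises ValueError
import Mathlib
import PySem

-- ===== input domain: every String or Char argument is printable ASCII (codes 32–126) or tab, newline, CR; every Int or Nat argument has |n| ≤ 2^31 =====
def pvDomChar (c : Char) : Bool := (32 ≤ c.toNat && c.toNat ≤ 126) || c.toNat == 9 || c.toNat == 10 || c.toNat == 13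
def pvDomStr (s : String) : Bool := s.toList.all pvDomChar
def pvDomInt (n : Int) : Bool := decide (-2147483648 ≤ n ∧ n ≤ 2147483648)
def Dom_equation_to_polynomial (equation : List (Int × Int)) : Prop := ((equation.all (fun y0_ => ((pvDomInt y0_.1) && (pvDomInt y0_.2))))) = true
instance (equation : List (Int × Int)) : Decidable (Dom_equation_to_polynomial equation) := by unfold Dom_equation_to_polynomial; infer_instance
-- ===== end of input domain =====

-- B scatters each (degree, coeff) item into a preallocated descending list in one pass,
-- replacing A's per-degree lookup with quadratic insert(0, ...); measured objective: faster.


-- ===== PORT A =====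
def equation_to_polynomial (equation : List (Int × Int)) : List Int :=
  -- max_degree = max(list(equation.keys()))  (empty dict raises ValueError: excluded by Pre_)
  match PySem.List.max? (equation.map Prod.fst) (fun x => x) with
  | none => []
  | some max_degree =>
    (PySem.List.pyRange 0 (max_degree + 1) 1).foldl
      (fun polynomial_list deg =>
        match (PySem.Dict.mk equation).get? deg with
        | some c => PySem.List.insert polynomial_list 0 c     -- polynomial_list.insert(0, equation[deg])
        | none => PySem.List.insert polynomial_list 0 0)      -- except: polynomial_list.insert(0, 0)
      []

-- ===== PORT B =====
def equation_to_polynomial_alt (equation : List (Int × Int)) : List Int :=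
  match PySem.List.max? (equation.map Prod.fst) (fun x => x) with
  | none => []
  | some max_degree =>
    equation.foldl
      (fun result p =>
        if 0 ≤ p.1 then result.set (max_degree - p.1).toNat p.2 else result)
      (List.replicate (max_degree + 1).toNat 0)

-- ===== PRECONDITION & SPEC =====
-- Pre_ excludes the empty dict, on which A (and B) raise ValueError in max(), and assoc
-- lists with duplicate keys, which do not represent a Python dict (a dict's keys are unique,
-- so such lists never arise from A's caller; first-vs-last match there is anybody's choice).
def Pre_equation_to_polynomial (equation : List (Int × Int)) : Prop :=
  equation ≠ [] ∧ (equation.map Prod.fst).Nodup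
instance (equation : List (Int × Int)) : Decidable (Pre_equation_to_polynomial equation) := by
  unfold Pre_equation_to_polynomial; infer_instance

def pvWitness_equation_to_polynomial : (List (Int × Int)) := [(2, 3), (-4, 7), (0, 1)]

def Spec_equation_to_polynomial (equation : List (Int × Int)) (out : List Int) : Prop := out = equation_to_polynomial_alt equation
instance (equation : List (Int × Int)) (out : List Int) : Decidable (Spec_equation_to_polynomial equation out) := by unfold Spec_equation_to_polynomial; infer_instance

-- ===== CLAIM (what is proved, stated in full; the proofs are below) =====
def Claim_equal_equation_to_polynomial : Prop := ∀ (equation : List (Int × Int)), Dom_equation_to_polynomial equation → Pre_equation_to_polynomial equation → Spec_equation_to_polynomial equation (equation_to_polynomial equation)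

-- ===== LEMMAS AND PROOFS =====

-- A's loop: front-insertion over the range is the reversed map of per-degree lookup.
theorem foldl_insert_zero (f : Int → Int) :
    ∀ (l : List Int) (acc : List Int),
      l.foldl (fun acc d => f d :: acc) acc = (l.map f).reverse ++ acc := by
  intro l
  induction l with
  | nil => intro acc; simp
  | cons d t ih => intro acc; simp [List.foldl_cons, ih]

-- B's loop preserves the length of the accumulator.
theorem scatter_length (m : Int) :
    ∀ (l : List (Int × Int)) (res : List Int),
      (l.foldl (fun res p => if 0 ≤ p.1 then res.set (m - p.1).toNat p.2 else res) res).length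
        = res.length := by
  intro l
  induction l with
  | nil => intro res; rfl
  | cons p t ih =>
    intro res
    simp only [List.foldl_cons]
    rw [ih]
    split <;> simp

-- B's loop, pointwise: slot j holds the first value keyed m - j, else the initial entry.
theorem scatter_get (m : Int) :
    ∀ (l : List (Int × Int)) (res : List Int),
      (l.map Prod.fst).Nodup → (∀ p ∈ l, p.1 ≤ m) → res.length = (m + 1).toNat →
      ∀ j : Nat, j < (m + 1).toNat →
        (l.foldl (fun res p => if 0 ≤ p.1 then res.set (m - p.1).toNat p.2 else res) res)[j]?
          = match l.find? (fun p => p.1 == m - (j : Int)) with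
            | some p => some p.2
            | none => res[j]? := by
  intro l
  induction l with
  | nil => intro res _ _ _ j _; simp
  | cons p t ih =>
    intro res hnd hle hlen j hj
    rw [List.map_cons, List.nodup_cons] at hnd
    have hnd' : (t.map Prod.fst).Nodup := hnd.2
    have hnotmem : p.1 ∉ t.map Prod.fst := hnd.1
    have hle' : ∀ q ∈ t, q.1 ≤ m := fun q hq => hle q (List.mem_cons_of_mem _ hq)
    simp only [List.foldl_cons]
    set res' : List Int := if 0 ≤ p.1 then res.set (m - p.1).toNat p.2 else res with hres'
    have hlen' : res'.length = (m + 1).toNat := by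
      rw [hres']; split <;> simp [hlen]
    rw [ih res' hnd' hle' hlen' j hj]
    by_cases hkey : p.1 = m - (j : Int)
    · -- head matches the slot key; by Nodup no pair in t does
      have htf : t.find? (fun q => q.1 == m - (j : Int)) = none := by
        rw [List.find?_eq_none]
        intro q hq hbeq
        exact hnotmem (by
          have : q.1 = m - (j : Int) := by simpa using hbeq
          rw [hkey, ← this]; exact List.mem_map_of_mem hq)
      have hd0 : (0 : Int) ≤ p.1 := by
        have : (j : Int) ≤ m := by omega
        omega
      have hidx : (m - p.1).toNat = j := by omega
      simp only [htf, List.find?_cons, hkey, hres']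
      simp only [hkey] at hd0 hidx
      rw [if_pos hd0, hidx, List.getElem?_set_self (by omega)]
      simp
    · -- head does not match: the head's write (if any) lands in another slot
      have hb : (p.1 == m - (j : Int)) = false := by simpa using hkey
      rw [List.find?_cons, hb]
      cases htf : t.find? (fun q => q.1 == m - (j : Int)) with
      | some q => simp
      | none =>
        simp only
        rw [hres']
        split
        · next hd0 =>
          have hne : (m - p.1).toNat ≠ j := by
            have := hle p (List.mem_cons_self)
            omega
          rw [List.getElem?_set_ne hne]
        · rfl

-- no-duplicate assoc list: Dict.mk lookup is first-match find?.
theorem dict_mk_get?_eq_find? (equation : List (Int × Int)) (k : Int) :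
    (PySem.Dict.mk equation).get? k
      = (equation.find? (fun p => p.1 == k)).map Prod.snd := by
  induction equation with
  | nil => rfl
  | cons p t ih =>
    rw [List.find?_cons]
    cases hb : (p.1 == k) with
    | true =>
      have : (PySem.Dict.mk (p :: t)).get? k = some p.2 := by
        cases p; simp [PySem.Dict.get?_mk_cons, hb]
      simp [this]
    | false =>
      have : (PySem.Dict.mk (p :: t)).get? k = (PySem.Dict.mk t).get? k := by
        cases p; simp_all [PySem.Dict.get?_mk_cons]
      simp [this, ih]

-- ===== VERDICT (by name: the statement is the Claim_ definition above) =====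
theorem equation_to_polynomial_spec : Claim_equal_equation_to_polynomial := by
  intro equation _ hpre
  obtain ⟨hne, hnd⟩ := hpre
  unfold Spec_equation_to_polynomial equation_to_polynomial equation_to_polynomial_alt
  cases hmax : PySem.List.max? (equation.map Prod.fst) (fun x => x) with
  | none =>
    cases equation with
    | nil => exact absurd rfl hne
    | cons q t =>
      exact absurd hmax (by simp [PySem.List.max?_id_cons])
  | some m =>
    have hle : ∀ p ∈ equation, p.1 ≤ m := by
      intro p hp
      exact PySem.List.max?_isMax hmax _ (List.mem_map_of_mem hp)
    -- rewrite A's body into the insert-free cons form, then into reversed map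
    have hA : ((PySem.List.pyRange 0 (m + 1) 1).foldl
        (fun polynomial_list deg =>
          match (PySem.Dict.mk equation).get? deg with
          | some c => PySem.List.insert polynomial_list 0 c
          | none => PySem.List.insert polynomial_list 0 0) []) =
        ((PySem.List.pyRange 0 (m + 1) 1).map
          (fun d => (((equation.find? (fun p => p.1 == d)).map Prod.snd).getD 0))).reverse := by
      have hbody : (fun (polynomial_list : List Int) (deg : Int) =>
          match (PySem.Dict.mk equation).get? deg with
          | some c => PySem.List.insert polynomial_list 0 c
          | none => PySem.List.insert polynomial_list 0 0) =
          (fun acc d => (((equation.find? (fun p => p.1 == d)).map Prod.snd).getD 0) :: acc) := by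
        funext acc d
        rw [dict_mk_get?_eq_find?]
        cases (equation.find? (fun p => p.1 == d)).map Prod.snd <;>
          simp [PySem.List.insert_zero]
      rw [hbody, foldl_insert_zero, List.append_nil]
    dsimp only
    rw [hA]
    -- both sides elementwise
    apply List.ext_getElem?
    intro j
    by_cases hj : j < (m + 1).toNat
    · have hjm : (j : Int) ≤ m := by omega
      rw [scatter_get m equation (List.replicate (m + 1).toNat 0) hnd hle (by simp) j hj]
      have hrev : (((PySem.List.pyRange 0 (m + 1) 1).map
          (fun d => (((equation.find? (fun p => p.1 == d)).map Prod.snd).getD 0))).reverse)[j]?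
          = some (((equation.find? (fun p => p.1 == m - (j : Int))).map Prod.snd).getD 0) := by
        rw [List.getElem?_reverse (by simp [PySem.List.length_pyRange_one]; omega)]
        have hlen : ((PySem.List.pyRange 0 (m + 1) 1).map
            (fun d => (((equation.find? (fun p => p.1 == d)).map Prod.snd).getD 0))).length
            = (m + 1).toNat := by simp [PySem.List.length_pyRange_one]
        rw [List.getElem?_map]
        rw [PySem.List.getElem?_pyRange_one]
        have hlt : (m + 1).toNat - 1 - j < (m + 1 - 0).toNat := by omega
        simp only [hlen]
        simp only [Int.sub_zero]
        rw [if_pos (by omega)]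
        simp only [Option.map_some]
        have harg : (0 : Int) + (((m + 1).toNat - 1 - j : Nat) : Int) = m - (j : Int) := by omega
        rw [harg]
      rw [hrev]
      cases equation.find? (fun p => p.1 == m - (j : Int)) with
      | some p => simp
      | none => simp [hj]
    · -- out of range on both sides
      have h1 : (((PySem.List.pyRange 0 (m + 1) 1).map
          (fun d => (((equation.find? (fun p => p.1 == d)).map Prod.snd).getD 0))).reverse)[j]?
          = none := by
        apply List.getElem?_eq_none
        simp [PySem.List.length_pyRange_one]; omega
      have h2 : ((equation.foldl
          (fun res p => if 0 ≤ p.1 then res.set (m - p.1).toNat p.2 else res)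
          (List.replicate (m + 1).toNat 0)))[j]? = none := by
        apply List.getElem?_eq_none
        rw [scatter_length]; simp; omega
      rw [h1, h2]
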